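-- pv_equiv track=rewrite | github.com/angr/angr | angr/analyses/dominance_frontier.py | calculate_iterated_dominace_frontier_set
-- ===== SOURCE A (Python) =====
-- def calculate_iterated_dominace_frontier_set(frontiers: dict, blocks: set) -> set:
--     last_frontier: set | None = None
--     while True:
--         frontier = set()
--         for b in blocks:
--             if b in frontiers:
--                 frontier |= frontiers[b]
--         if last_frontier is not None and last_frontier == frontier:
--             break
--         last_frontier = frontier
--         blocks |= frontier
--     return last_frontier
-- ===== SOURCE B (Python) =====
-- def calculate_iterated_dominace_frontier_set(frontiers: dict, blocks: set) -> set: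
--     # Worklist: each block is processed exactly once; newly seen frontier
--     # nodes are appended to the worklist. (Does not mutate `blocks`.)
--     worklist = list(blocks)
--     seen = set(worklist)
--     result = set()
--     i = 0
--     while i < len(worklist):
--         b = worklist[i]
--         i += 1
--         fr = frontiers.get(b)
--         if fr is None:
--             continue
--         result |= fr
--         for x in fr:
--             if x not in seen:
--                 seen.add(x)
--                 worklist.append(x)
--     return result
-- ===== Notes on version B (the rewrite author's own statement) =====
-- stated objective: alternative
-- what changed: A repeatedly recomputes the whole frontier union over the growing block set until it stops changing; B processes each block exactly once with a worklist, enqueuing newly seen frontier nodes, and B does not mutate the blocks argument in place as A does.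
import Mathlib
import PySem

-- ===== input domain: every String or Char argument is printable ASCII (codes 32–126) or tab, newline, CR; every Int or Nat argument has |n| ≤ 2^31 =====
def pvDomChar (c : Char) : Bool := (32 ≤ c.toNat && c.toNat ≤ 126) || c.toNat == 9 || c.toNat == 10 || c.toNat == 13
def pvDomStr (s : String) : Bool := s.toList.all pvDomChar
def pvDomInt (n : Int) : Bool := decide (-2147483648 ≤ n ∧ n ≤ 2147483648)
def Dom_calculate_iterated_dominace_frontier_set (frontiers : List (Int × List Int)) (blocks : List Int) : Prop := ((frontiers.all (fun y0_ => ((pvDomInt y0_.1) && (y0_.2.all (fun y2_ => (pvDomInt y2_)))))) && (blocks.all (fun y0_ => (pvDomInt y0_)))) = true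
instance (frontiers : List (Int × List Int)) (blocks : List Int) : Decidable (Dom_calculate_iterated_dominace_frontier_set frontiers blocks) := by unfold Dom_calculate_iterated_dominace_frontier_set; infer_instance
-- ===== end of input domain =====

-- B replaces A's recompute-until-fixpoint rounds by a worklist that handles each block once
-- (objective: alternative). Python A mutates `blocks` in place (blocks |= frontier); B does
-- not — the equivalence proved here is about the RETURN value only.

-- shared dict-lookup helper (both Pythons read `frontiers[b]` / `frontiers.get(b)`)
def pvFr (frontiers : List (Int × List Int)) (b : Int) : List Int :=
  (PySem.Dict.mk frontiers).getD b []

-- universe of all frontier values; both loops' termination measures live inside it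
def pvUniv (frontiers : List (Int × List Int)) : Finset Int :=
  (frontiers.flatMap (fun p => p.2)).toFinset

lemma pvFr_mem_univ (frontiers : List (Int × List Int)) (b x : Int)
    (hx : x ∈ pvFr frontiers b) : x ∈ pvUniv frontiers := by
  simp only [pvFr, PySem.Dict.getD] at hx
  rcases hf : (PySem.Dict.mk frontiers).get? b with _ | v
  · simp [hf] at hx
  · rw [hf] at hx
    simp only [Option.getD_some] at hx
    simp only [PySem.Dict.get?] at hf
    rcases hfind : List.find? (fun p => p.1 == b) (PySem.Dict.mk frontiers).items with _ | p
    · simp [hfind] at hf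
    · have hp : p ∈ frontiers := List.mem_of_find?_eq_some hfind
      rw [hfind] at hf
      simp only [Option.map_some] at hf
      have hv : p.2 = v := Option.some.inj hf
      simp only [pvUniv, List.mem_toFinset, List.mem_flatMap]
      exact ⟨p, hp, by rw [hv]; exact hx⟩

-- `fresh xs seen`: the elements of xs not yet in seen, first occurrences, in order
def pvFresh (xs seen : List Int) : List Int :=
  match xs with
  | [] => []
  | x :: t => if PySem.Set.contains seen x then pvFresh t seen else x :: pvFresh t (seen ++ [x])

lemma union_eq_append_pvFresh (s t : List Int) :
    PySem.Set.union s t = s ++ pvFresh t s := by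
  induction t generalizing s with
  | nil => simp [PySem.Set.union, PySem.Set.update_nil, pvFresh]
  | cons x t ih =>
    simp only [PySem.Set.union, PySem.Set.update_cons, pvFresh] at *
    by_cases hx : x ∈ s
    · rw [PySem.Set.add_of_mem hx, if_pos ((PySem.Set.contains_iff s x).mpr hx)]
      exact ih s
    · rw [PySem.Set.add_of_not_mem hx, if_neg (by simp [hx])]
      rw [ih (s ++ [x])]
      simp

lemma pvFresh_sound (xs : List Int) : ∀ seen, (pvFresh xs seen).Nodup ∧
    ∀ a ∈ pvFresh xs seen, a ∈ xs ∧ a ∉ seen := by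
  induction xs with
  | nil => intro seen; simp [pvFresh]
  | cons x t ih =>
    intro seen
    simp only [pvFresh]
    by_cases hx : x ∈ seen
    · rw [if_pos ((PySem.Set.contains_iff seen x).mpr hx)]
      refine ⟨(ih seen).1, fun a ha => ⟨List.mem_cons_of_mem _ ((ih seen).2 a ha).1,
        ((ih seen).2 a ha).2⟩⟩
    · rw [if_neg (by simp [hx])]
      have h2 := (ih (seen ++ [x])).2
      constructor
      · exact List.nodup_cons.mpr ⟨fun hmem => by simpa using (h2 x hmem).2, (ih (seen ++ [x])).1⟩
      · intro a ha
        rcases List.mem_cons.mp ha with rfl | ha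
        · exact ⟨List.mem_cons_self, hx⟩
        · exact ⟨List.mem_cons_of_mem _ (h2 a ha).1, fun hs => (h2 a ha).2 (by simp [hs])⟩

lemma pvFresh_nil_of_subset {xs seen : List Int} (h : ∀ a ∈ xs, a ∈ seen) :
    pvFresh xs seen = [] := by
  rcases he : pvFresh xs seen with _ | ⟨a, t⟩
  · rfl
  · have := (pvFresh_sound xs seen).2 a (by rw [he]; exact List.mem_cons_self)
    exact absurd (h a this.1) this.2

lemma union_eq_self_of_subset {s t : List Int} (h : ∀ a ∈ t, a ∈ s) :
    PySem.Set.union s t = s := by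
  rw [union_eq_append_pvFresh, pvFresh_nil_of_subset h, List.append_nil]

lemma pvCard_append (U : Finset Int) (seen fresh : List Int) (hN : fresh.Nodup)
    (hs : ∀ a ∈ fresh, a ∉ seen) (hU : ∀ a ∈ fresh, a ∈ U) :
    (U \ (seen ++ fresh).toFinset).card + fresh.length = (U \ seen.toFinset).card := by
  have h1 : U \ (seen ++ fresh).toFinset = (U \ seen.toFinset) \ fresh.toFinset := by
    ext a; simp; tauto
  have h2 : fresh.toFinset ⊆ U \ seen.toFinset := by
    intro a ha
    simp only [List.mem_toFinset] at ha
    simp only [Finset.mem_sdiff, List.mem_toFinset]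
    exact ⟨hU a ha, hs a ha⟩
  have h3 := Finset.card_sdiff_add_card_eq_card h2
  rw [h1, ← List.toFinset_card_of_nodup hN] at *
  omega

-- ===== PORT A =====
-- A's inner loop body: `if b in frontiers: frontier |= frontiers[b]`
def pvStepA (frontiers : List (Int × List Int)) (frontier : List Int) (b : Int) : List Int :=
  if (PySem.Dict.mk frontiers).contains b then
    PySem.Set.union frontier ((PySem.Dict.mk frontiers).getD b [])
  else frontier

-- one round of A: frontier = ⋃ frontiers[b] for b in blocks
def pvFrontierOf (frontiers : List (Int × List Int)) (blocks : List Int) : List Int :=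
  blocks.foldl (pvStepA frontiers) []

lemma pvFrontierOf_mem_univ (frontiers : List (Int × List Int)) (blocks : List Int) (x : Int)
    (hx : x ∈ pvFrontierOf frontiers blocks) : x ∈ pvUniv frontiers := by
  suffices h : ∀ (bs : List Int) (acc : List Int),
      x ∈ bs.foldl (pvStepA frontiers) acc → x ∈ acc ∨ x ∈ pvUniv frontiers by
    rcases h blocks [] hx with h | h
    · simp at h
    · exact h
  intro bs
  induction bs with
  | nil => intro acc h; exact Or.inl h
  | cons b t ih =>
    intro acc h
    rw [List.foldl_cons] at h
    rcases ih _ h with h' | h'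
    · unfold pvStepA at h'
      by_cases hc : (PySem.Dict.mk frontiers).contains b
      · rw [if_pos hc] at h'
        rcases (PySem.Set.mem_union _ _ _).mp h' with h'' | h''
        · exact Or.inl h''
        · exact Or.inr (pvFr_mem_univ frontiers b x h'')
      · rw [if_neg hc] at h'; exact Or.inl h'
    · exact Or.inr h'

-- termination measure of A's while-loop
def pvMuA (frontiers : List (Int × List Int)) (blocks : List Int) (last : Option (List Int)) : Nat :=
  2 * ((pvUniv frontiers) \ blocks.toFinset).card +
    (match last with
     | some lf => if PySem.Set.equal lf (pvFrontierOf frontiers blocks) then 0 else 1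
     | none => 1)

lemma pvMuA_dec (frontiers : List (Int × List Int)) (blocks : List Int)
    (last : Option (List Int))
    (h : last = none ∨ ∃ lf, last = some lf ∧
          PySem.Set.equal lf (pvFrontierOf frontiers blocks) = false) :
    pvMuA frontiers (PySem.Set.union blocks (pvFrontierOf frontiers blocks))
      (some (pvFrontierOf frontiers blocks)) < pvMuA frontiers blocks last := by
  have hflag : (match last with
     | some lf => if PySem.Set.equal lf (pvFrontierOf frontiers blocks) then 0 else 1
     | none => 1) = 1 := by
    rcases h with rfl | ⟨lf, rfl, hlf⟩
    · rfl
    · simp [hlf]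
  by_cases hsub : ∀ x ∈ pvFrontierOf frontiers blocks, x ∈ blocks
  · have hU : PySem.Set.union blocks (pvFrontierOf frontiers blocks) = blocks :=
      union_eq_self_of_subset hsub
    rw [hU]
    simp only [pvMuA, hflag]
    have : PySem.Set.equal (pvFrontierOf frontiers blocks) (pvFrontierOf frontiers blocks) = true :=
      (PySem.Set.equal_iff _ _).mpr (fun x => Iff.rfl)
    simp [this]
  · push_neg at hsub
    obtain ⟨x, hxF, hxb⟩ := hsub
    have hcard : ((pvUniv frontiers) \ (PySem.Set.union blocks (pvFrontierOf frontiers blocks)).toFinset).card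
        < ((pvUniv frontiers) \ blocks.toFinset).card := by
      apply Finset.card_lt_card
      constructor
      · intro a ha
        simp only [Finset.mem_sdiff, List.mem_toFinset] at *
        exact ⟨ha.1, fun hm => ha.2 ((PySem.Set.mem_union _ _ _).mpr (Or.inl hm))⟩
      · intro hsub'
        have hx1 : x ∈ (pvUniv frontiers) \ blocks.toFinset := by
          simp only [Finset.mem_sdiff, List.mem_toFinset]
          exact ⟨pvFrontierOf_mem_univ frontiers blocks x hxF, hxb⟩
        have hx2 := hsub' hx1
        simp only [Finset.mem_sdiff, List.mem_toFinset] at hx2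
        exact hx2.2 ((PySem.Set.mem_union _ _ _).mpr (Or.inr hxF))
    simp only [pvMuA, hflag]
    have hle : (if PySem.Set.equal (pvFrontierOf frontiers blocks)
        (pvFrontierOf frontiers (PySem.Set.union blocks (pvFrontierOf frontiers blocks))) then 0 else 1) ≤ 1 := by
      split <;> omega
    omega

-- A's while-loop: recompute the whole frontier over the grown block set until it stops changing
def pvLoopA (frontiers : List (Int × List Int)) (blocks : List Int)
    (last : Option (List Int)) : List Int :=
  let frontier := pvFrontierOf frontiers blocks
  match last with
  | some lf =>
    if PySem.Set.equal lf frontier then lf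
    else pvLoopA frontiers (PySem.Set.union blocks frontier) (some frontier)
  | none => pvLoopA frontiers (PySem.Set.union blocks frontier) (some frontier)
termination_by pvMuA frontiers blocks last
decreasing_by
  · rename_i hne
    exact pvMuA_dec frontiers blocks (some lf) (Or.inr ⟨lf, rfl, Bool.eq_false_iff.mpr hne⟩)
  · exact pvMuA_dec frontiers blocks none (Or.inl rfl)

def calculate_iterated_dominace_frontier_set (frontiers : List (Int × List Int))
    (blocks : List Int) : List Int :=
  pvLoopA frontiers blocks none

-- ===== PORT B =====
-- termination measure of B's worklist loop
def pvMuB (frontiers : List (Int × List Int)) (pending : List Int) (seen : List Int) : Nat :=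
  ((pvUniv frontiers) \ seen.toFinset).card + pending.length

lemma pvMuB_dec (frontiers : List (Int × List Int)) (seen rest : List Int) (b : Int) :
    pvMuB frontiers (rest ++ pvFresh (pvFr frontiers b) seen)
        (seen ++ pvFresh (pvFr frontiers b) seen) < pvMuB frontiers (b :: rest) seen := by
  have hs := pvFresh_sound (pvFr frontiers b) seen
  have hcard := pvCard_append (pvUniv frontiers) seen (pvFresh (pvFr frontiers b) seen)
    hs.1 (fun a ha => (hs.2 a ha).2)
    (fun a ha => pvFr_mem_univ frontiers b a (hs.2 a ha).1)
  simp only [pvMuB, List.length_append, List.length_cons]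
  omega

-- the inner `for x in fr: if x not in seen: …` loop, as a fold over (seen, worklist)
def pvInner (f : List Int) (seen : PySem.Set Int) (w : List Int) : PySem.Set Int × List Int :=
  f.foldl (fun (sw : PySem.Set Int × List Int) x =>
      if PySem.Set.contains sw.1 x then sw else (PySem.Set.add sw.1 x, sw.2 ++ [x])) (seen, w)

lemma pvFoldNew (f : List Int) : ∀ (seen w : List Int),
    pvInner f seen w = (seen ++ pvFresh f seen, w ++ pvFresh f seen) := by
  induction f with
  | nil => intro seen w; simp [pvInner, pvFresh]
  | cons x t ih =>
    intro seen w
    simp only [pvInner, List.foldl_cons, pvFresh] at *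
    by_cases hx : x ∈ seen
    · rw [if_pos ((PySem.Set.contains_iff seen x).mpr hx),
        if_pos ((PySem.Set.contains_iff seen x).mpr hx)]
      exact ih seen w
    · rw [if_neg (by simp [hx]), if_neg (by simp [hx])]
      rw [PySem.Set.add_of_not_mem hx, ih (seen ++ [x]) (w ++ [x])]
      simp

-- B's worklist loop: pop a pending block, union its frontier in, enqueue newly seen nodes
def pvLoopB (frontiers : List (Int × List Int)) (pending : List Int)
    (seen : PySem.Set Int) (result : PySem.Set Int) : List Int :=
  match pending with
  | [] => result
  | b :: rest =>
    match hget : (PySem.Dict.mk frontiers).get? b with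
    | none => pvLoopB frontiers rest seen result
    | some f =>
      let sw := pvInner f seen rest
      pvLoopB frontiers sw.2 sw.1 (PySem.Set.union result f)
termination_by pvMuB frontiers pending seen
decreasing_by
  · simp only [pvMuB, List.length_cons]; omega
  · rw [pvFoldNew]
    have h : pvFr frontiers b = f := by simp [pvFr, PySem.Dict.getD, hget]
    rw [← h]
    exact pvMuB_dec frontiers seen rest b

def calculate_iterated_dominace_frontier_set_alt (frontiers : List (Int × List Int))
    (blocks : List Int) : List Int :=
  pvLoopB frontiers blocks (PySem.Set.ofList blocks) PySem.Set.empty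

-- ===== PRECONDITION & SPEC =====
-- Pre_ is the encoding invariant of the `blocks: set` parameter (a Python set has no
-- duplicate elements), so it excludes no input the Python function actually receives.
def Pre_calculate_iterated_dominace_frontier_set (frontiers : List (Int × List Int)) (blocks : List Int) : Prop :=
  blocks.Nodup
instance (frontiers : List (Int × List Int)) (blocks : List Int) : Decidable (Pre_calculate_iterated_dominace_frontier_set frontiers blocks) := by unfold Pre_calculate_iterated_dominace_frontier_set; infer_instance
def pvWitness_calculate_iterated_dominace_frontier_set : (List (Int × List Int)) × List Int :=
  ([(0, [1]), (1, [2])], [0])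
def Spec_calculate_iterated_dominace_frontier_set (frontiers : List (Int × List Int)) (blocks : List Int) (out : List Int) : Prop := out = calculate_iterated_dominace_frontier_set_alt frontiers blocks
instance (frontiers : List (Int × List Int)) (blocks : List Int) (out : List Int) : Decidable (Spec_calculate_iterated_dominace_frontier_set frontiers blocks out) := by unfold Spec_calculate_iterated_dominace_frontier_set; infer_instance

-- ===== CLAIM (what is proved, stated in full; the proofs are below) =====
def Claim_equal_calculate_iterated_dominace_frontier_set : Prop := ∀ (frontiers : List (Int × List Int)) (blocks : List Int), Dom_calculate_iterated_dominace_frontier_set frontiers blocks → Pre_calculate_iterated_dominace_frontier_set frontiers blocks → Spec_calculate_iterated_dominace_frontier_set frontiers blocks (calculate_iterated_dominace_frontier_set frontiers blocks)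

-- ===== LEMMAS AND PROOFS =====

-- A's loop body equals "union in the frontier of b" (the guard only skips an empty union)
lemma pvStepA_eq (frontiers : List (Int × List Int)) (f : List Int) (b : Int) :
    pvStepA frontiers f b = PySem.Set.union f (pvFr frontiers b) := by
  unfold pvStepA pvFr
  by_cases hc : (PySem.Dict.mk frontiers).contains b
  · rw [if_pos hc]
  · rw [if_neg hc]
    have hnone : (PySem.Dict.mk frontiers).get? b = none := by
      rw [PySem.Dict.contains_eq_isSome_get?] at hc
      exact Option.not_isSome_iff_eq_none.mp (by simpa using hc)
    simp [PySem.Dict.getD, hnone, PySem.Set.union, PySem.Set.update_nil]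

lemma pvStepA_eq' (frontiers : List (Int × List Int)) (f : List Int) (b : Int) :
    pvStepA frontiers f b = f ++ pvFresh (pvFr frontiers b) f := by
  rw [pvStepA_eq, union_eq_append_pvFresh]

lemma prefix_foldl_stepA (frontiers : List (Int × List Int)) (bs : List Int) :
    ∀ L : List Int, L <+: bs.foldl (pvStepA frontiers) L := by
  induction bs with
  | nil => intro L; exact List.prefix_rfl
  | cons b t ih =>
    intro L
    rw [List.foldl_cons]
    exact List.IsPrefix.trans (by rw [pvStepA_eq']; exact List.prefix_append _ _) (ih _)

lemma nodup_foldl_stepA (frontiers : List (Int × List Int)) (bs : List Int) :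
    ∀ L : List Int, L.Nodup → (bs.foldl (pvStepA frontiers) L).Nodup := by
  induction bs with
  | nil => intro L h; exact h
  | cons b t ih =>
    intro L h
    rw [List.foldl_cons]
    exact ih _ (by rw [pvStepA_eq]; exact PySem.Set.nodup_union _ _ h)

lemma mem_foldl_stepA_of_mem (frontiers : List (Int × List Int)) (bs : List Int)
    {x : Int} : ∀ {L : List Int}, x ∈ L → x ∈ bs.foldl (pvStepA frontiers) L :=
  fun h => (prefix_foldl_stepA frontiers bs _).subset h

-- any member's frontier is contained in the round's frontier union
lemma pvFr_subset_foldl (frontiers : List (Int × List Int)) (bs : List Int) {b x : Int}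
    (hb : b ∈ bs) (hx : x ∈ pvFr frontiers b) :
    ∀ L : List Int, x ∈ bs.foldl (pvStepA frontiers) L := by
  induction bs with
  | nil => cases hb
  | cons c t ih =>
    intro L
    rw [List.foldl_cons]
    rcases List.mem_cons.mp hb with rfl | hb'
    · apply mem_foldl_stepA_of_mem
      rw [pvStepA_eq]
      exact (PySem.Set.mem_union _ _ _).mpr (Or.inr hx)
    · exact ih hb' _

lemma update_pvFresh_of_subset (t : List Int) : ∀ (X a : List Int), (∀ y ∈ a, y ∈ X) →
    PySem.Set.update X (pvFresh t a) = PySem.Set.update X t := by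
  induction t with
  | nil => intro X a _; simp [pvFresh]
  | cons x t ih =>
    intro X a ha
    simp only [pvFresh]
    by_cases hx : x ∈ a
    · rw [if_pos ((PySem.Set.contains_iff a x).mpr hx), ih X a ha,
        PySem.Set.update_cons, PySem.Set.add_of_mem (ha x hx)]
    · rw [if_neg (by simp [hx]), PySem.Set.update_cons,
        PySem.Set.update_cons]
      exact ih (PySem.Set.add X x) (a ++ [x]) (fun y hy => by
        rcases List.mem_append.mp hy with hy | hy
        · exact (PySem.Set.mem_add _ _ _).mpr (Or.inl (ha y hy))
        · exact (PySem.Set.mem_add _ _ _).mpr (Or.inr (by simpa using hy)))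

lemma pvUnion_assoc (S a t : List Int) :
    PySem.Set.union S (PySem.Set.union a t) = PySem.Set.union (PySem.Set.union S a) t := by
  have h1 : PySem.Set.union a t = a ++ pvFresh t a := union_eq_append_pvFresh a t
  rw [h1, PySem.Set.union_eq_update, PySem.Set.update_append,
    PySem.Set.union_eq_update S a, PySem.Set.union_eq_update (PySem.Set.update S a) t]
  exact update_pvFresh_of_subset t _ a
    (fun y hy => (PySem.Set.mem_update _ _ _).mpr (Or.inr hy))

-- a round's fold factors through any set already unioned in
lemma pvFoldU (frontiers : List (Int × List Int)) (bs : List Int) :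
    ∀ S acc : List Int, bs.foldl (pvStepA frontiers) (PySem.Set.union S acc)
      = PySem.Set.union S (bs.foldl (pvStepA frontiers) acc) := by
  induction bs with
  | nil => intro S acc; rfl
  | cons b t ih =>
    intro S acc
    rw [List.foldl_cons, List.foldl_cons, pvStepA_eq, pvStepA_eq,
      ← pvUnion_assoc S acc (pvFr frontiers b)]
    exact ih S _

lemma prefix_eq_of_mem_iff {s t : List Int} (hp : s <+: t) (hn : t.Nodup)
    (hm : ∀ x, x ∈ s ↔ x ∈ t) : s = t := by
  obtain ⟨r, rfl⟩ := hp
  have hr : r = [] := by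
    rcases r with _ | ⟨a, r'⟩
    · rfl
    · exfalso
      have ha : a ∈ s := (hm a).mpr (by simp)
      have := List.disjoint_of_nodup_append hn
      exact this ha (by simp)
  rw [hr, List.append_nil]

-- the closure order: process pending blocks once each, appending newly seen frontier nodes
def pvClos (frontiers : List (Int × List Int)) (seen pending : List Int) : List Int :=
  match pending with
  | [] => seen
  | b :: rest =>
    pvClos frontiers (seen ++ pvFresh (pvFr frontiers b) seen)
      (rest ++ pvFresh (pvFr frontiers b) seen)
termination_by pvMuB frontiers pending seen
decreasing_by exact pvMuB_dec frontiers seen rest b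

lemma pvClos_fix (frontiers : List (Int × List Int)) (pending : List Int) :
    ∀ seen : List Int, (∀ b ∈ pending, ∀ x ∈ pvFr frontiers b, x ∈ seen) →
      pvClos frontiers seen pending = seen := by
  induction pending with
  | nil => intro seen _; rw [pvClos]
  | cons b rest ih =>
    intro seen h
    rw [pvClos, pvFresh_nil_of_subset (h b (by simp))]
    simp only [List.append_nil]
    exact ih seen (fun c hc => h c (by simp [hc]))

-- one round of the closure: processing `bs` ahead of `extra` equals jumping to the
-- grown seen-list with the newly appended nodes queued behind `extra`
lemma pvRound (frontiers : List (Int × List Int)) (bs : List Int) :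
    ∀ seen extra : List Int,
      pvClos frontiers seen (bs ++ extra)
        = pvClos frontiers (bs.foldl (pvStepA frontiers) seen)
            (extra ++ (bs.foldl (pvStepA frontiers) seen).drop seen.length) := by
  induction bs with
  | nil =>
    intro seen extra
    simp
  | cons b t ih =>
    intro seen extra
    have hstep : pvStepA frontiers seen b = seen ++ pvFresh (pvFr frontiers b) seen :=
      pvStepA_eq' frontiers seen b
    rw [List.cons_append, pvClos, List.append_assoc t extra]
    rw [ih (seen ++ pvFresh (pvFr frontiers b) seen) (extra ++ pvFresh (pvFr frontiers b) seen)]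
    rw [List.foldl_cons, hstep]
    obtain ⟨r, hr⟩ := prefix_foldl_stepA frontiers t (seen ++ pvFresh (pvFr frontiers b) seen)
    rw [← hr]
    congr 1
    rw [List.drop_left, List.append_assoc seen, List.drop_left]
    simp

-- B's worklist computes the frontier union along the closure order
lemma pvEqB (frontiers : List (Int × List Int)) : ∀ (n : Nat) (P pending : List Int),
    pvMuB frontiers pending (P ++ pending) ≤ n →
    pvLoopB frontiers pending (P ++ pending) (pvFrontierOf frontiers P)
      = pvFrontierOf frontiers (pvClos frontiers (P ++ pending) pending) := by
  intro n
  induction n with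
  | zero =>
    intro P pending hμ
    have hp : pending = [] := by
      simp only [pvMuB] at hμ
      exact List.length_eq_zero_iff.mp (by omega)
    subst hp
    rw [pvLoopB, pvClos]
    simp
  | succ n ih =>
    intro P pending hμ
    rcases pending with _ | ⟨b, rest⟩
    · rw [pvLoopB, pvClos]; simp
    · rw [pvLoopB, pvClos]
      rcases hget : (PySem.Dict.mk frontiers).get? b with _ | f
      · have hfr : pvFr frontiers b = [] := by simp [pvFr, PySem.Dict.getD, hget]
        have hF : pvFrontierOf frontiers (P ++ [b]) = pvFrontierOf frontiers P := by
          unfold pvFrontierOf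
          rw [List.foldl_append, List.foldl_cons, List.foldl_nil, pvStepA_eq, hfr,
            PySem.Set.union, PySem.Set.update_nil]
        have hseen : P ++ b :: rest = (P ++ [b]) ++ rest := by simp
        rw [hfr]
        simp only [pvFresh, List.append_nil]
        rw [hseen, ← hF, ih (P ++ [b]) rest (by
          simp only [pvMuB, List.length_cons, ← hseen] at *
          omega)]
      · have hfr : pvFr frontiers b = f := by simp [pvFr, PySem.Dict.getD, hget]
        have hcon : (PySem.Dict.mk frontiers).contains b = true := by
          rw [PySem.Dict.contains_eq_isSome_get?, hget]; rfl
        have hF : pvFrontierOf frontiers (P ++ [b])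
            = PySem.Set.union (pvFrontierOf frontiers P) f := by
          unfold pvFrontierOf
          rw [List.foldl_append, List.foldl_cons, List.foldl_nil]
          unfold pvStepA
          rw [if_pos hcon]
          simp [PySem.Dict.getD, hget]
        simp only [pvFoldNew]
        have hseen : (P ++ b :: rest) ++ pvFresh f (P ++ b :: rest)
            = (P ++ [b]) ++ (rest ++ pvFresh f (P ++ b :: rest)) := by simp
        rw [← hF] at *
        have hμ' : pvMuB frontiers (rest ++ pvFresh f (P ++ b :: rest))
            ((P ++ [b]) ++ (rest ++ pvFresh f (P ++ b :: rest))) ≤ n := by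
          have := pvMuB_dec frontiers (P ++ b :: rest) rest b
          rw [hfr] at this
          rw [← hseen]
          simp only [pvMuB] at *
          omega
        rw [hseen, ih (P ++ [b]) (rest ++ pvFresh f (P ++ b :: rest)) hμ']
        rw [hfr, ← hseen]

-- the stopping state: when a round adds nothing new, the closure adds nothing either
lemma pvStop (frontiers : List (Int × List Int)) (T : List Int)
    (heq : PySem.Set.equal (pvFrontierOf frontiers T)
      (pvFrontierOf frontiers (PySem.Set.union T (pvFrontierOf frontiers T))) = true) :
    pvFrontierOf frontiers T
      = pvFrontierOf frontiers
          (pvClos frontiers (PySem.Set.union T (pvFrontierOf frontiers T))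
            ((PySem.Set.union T (pvFrontierOf frontiers T)).drop T.length)) := by
  set S := PySem.Set.union T (pvFrontierOf frontiers T) with hS
  have hSN : S = T ++ pvFresh (pvFrontierOf frontiers T) T := by
    rw [hS, union_eq_append_pvFresh]
  -- F T is a prefix of F S with the same elements, hence equal
  have hFS : pvFrontierOf frontiers S
      = (pvFresh (pvFrontierOf frontiers T) T).foldl (pvStepA frontiers)
          (pvFrontierOf frontiers T) := by
    rw [hSN]; unfold pvFrontierOf; rw [List.foldl_append]
  have hpre : pvFrontierOf frontiers T <+: pvFrontierOf frontiers S := by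
    rw [hFS]; exact prefix_foldl_stepA frontiers _ _
  have hnd : (pvFrontierOf frontiers S).Nodup :=
    nodup_foldl_stepA frontiers S [] List.nodup_nil
  have hFeq : pvFrontierOf frontiers T = pvFrontierOf frontiers S :=
    prefix_eq_of_mem_iff hpre hnd ((PySem.Set.equal_iff _ _).mp heq)
  have hfix : pvClos frontiers S (S.drop T.length) = S := by
    apply pvClos_fix
    intro b hb x hx
    have hbS : b ∈ S := List.mem_of_mem_drop hb
    have hxFS : x ∈ pvFrontierOf frontiers S := pvFr_subset_foldl frontiers S hbS hx []
    rw [← hFeq] at hxFS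
    rw [hS]
    exact (PySem.Set.mem_union _ _ _).mpr (Or.inr hxFS)
  rw [hfix, ← hFeq]

-- A's next-round state reached from S keeps the closure value
lemma pvNext (frontiers : List (Int × List Int)) (T : List Int) :
    pvClos frontiers (PySem.Set.union T (pvFrontierOf frontiers T))
        ((PySem.Set.union T (pvFrontierOf frontiers T)).drop T.length)
      = pvClos frontiers
          (PySem.Set.union (PySem.Set.union T (pvFrontierOf frontiers T))
            (pvFrontierOf frontiers (PySem.Set.union T (pvFrontierOf frontiers T))))
          ((PySem.Set.union (PySem.Set.union T (pvFrontierOf frontiers T))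
            (pvFrontierOf frontiers (PySem.Set.union T (pvFrontierOf frontiers T)))).drop
              (PySem.Set.union T (pvFrontierOf frontiers T)).length) := by
  set S := PySem.Set.union T (pvFrontierOf frontiers T) with hS
  have hSN : S = T ++ pvFresh (pvFrontierOf frontiers T) T := by
    rw [hS, union_eq_append_pvFresh]
  have htake : S.take T.length = T := by rw [hSN]; exact List.take_left
  have hsub : ∀ x ∈ pvFrontierOf frontiers T, x ∈ S := by
    intro x hx; rw [hS]; exact (PySem.Set.mem_union _ _ _).mpr (Or.inr hx)
  have hW : (S.drop T.length).foldl (pvStepA frontiers) S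
      = PySem.Set.union S (pvFrontierOf frontiers S) := by
    have h1 : PySem.Set.union S (pvFrontierOf frontiers T) = S := union_eq_self_of_subset hsub
    calc (S.drop T.length).foldl (pvStepA frontiers) S
        = (S.drop T.length).foldl (pvStepA frontiers)
            (PySem.Set.union S (pvFrontierOf frontiers T)) := by rw [h1]
      _ = PySem.Set.union S ((S.drop T.length).foldl (pvStepA frontiers)
            (pvFrontierOf frontiers T)) := pvFoldU frontiers _ S _
      _ = PySem.Set.union S (pvFrontierOf frontiers S) := by
          congr 1
          conv_rhs => rw [show S = S.take T.length ++ S.drop T.length from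
            (List.take_append_drop _ _).symm]
          unfold pvFrontierOf
          rw [List.foldl_append, htake]
  have := pvRound frontiers (S.drop T.length) S []
  rw [List.append_nil, List.nil_append] at this
  rw [this, hW]

-- A's loop, started one round in, computes the frontier union of the closure
lemma pvAlem (frontiers : List (Int × List Int)) : ∀ (n : Nat) (T : List Int),
    pvMuA frontiers (PySem.Set.union T (pvFrontierOf frontiers T))
      (some (pvFrontierOf frontiers T)) ≤ n →
    pvLoopA frontiers (PySem.Set.union T (pvFrontierOf frontiers T))
      (some (pvFrontierOf frontiers T))
      = pvFrontierOf frontiers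
          (pvClos frontiers (PySem.Set.union T (pvFrontierOf frontiers T))
            ((PySem.Set.union T (pvFrontierOf frontiers T)).drop T.length)) := by
  intro n
  induction n with
  | zero =>
    intro T hμ
    rw [pvLoopA]
    by_cases heq : PySem.Set.equal (pvFrontierOf frontiers T)
        (pvFrontierOf frontiers (PySem.Set.union T (pvFrontierOf frontiers T))) = true
    · rw [if_pos heq]
      exact pvStop frontiers T heq
    · exfalso
      simp only [pvMuA, Bool.not_eq_true] at hμ heq
      rw [heq] at hμ
      simp at hμ
  | succ n ih =>
    intro T hμ
    rw [pvLoopA]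
    by_cases heq : PySem.Set.equal (pvFrontierOf frontiers T)
        (pvFrontierOf frontiers (PySem.Set.union T (pvFrontierOf frontiers T))) = true
    · rw [if_pos heq]
      exact pvStop frontiers T heq
    · rw [if_neg heq]
      have hdec := pvMuA_dec frontiers (PySem.Set.union T (pvFrontierOf frontiers T))
        (some (pvFrontierOf frontiers T))
        (Or.inr ⟨_, rfl, Bool.eq_false_iff.mpr heq⟩)
      rw [ih (PySem.Set.union T (pvFrontierOf frontiers T)) (by omega)]
      exact (congrArg (pvFrontierOf frontiers) (pvNext frontiers T)).symm

theorem calculate_iterated_dominace_frontier_set_spec : Claim_equal_calculate_iterated_dominace_frontier_set := by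
  intro frontiers blocks _ hpre
  unfold Spec_calculate_iterated_dominace_frontier_set
  unfold calculate_iterated_dominace_frontier_set calculate_iterated_dominace_frontier_set_alt
  -- B's side: worklist = frontier union over the closure order
  have hB : pvLoopB frontiers blocks (PySem.Set.ofList blocks) PySem.Set.empty
      = pvFrontierOf frontiers (pvClos frontiers blocks blocks) := by
    have hof : PySem.Set.ofList blocks = blocks := PySem.Set.ofList_eq_self_of_nodup blocks hpre
    have h0 : pvFrontierOf frontiers ([] : List Int) = PySem.Set.empty := rfl
    have := pvEqB frontiers (pvMuB frontiers blocks blocks) [] blocks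
      (by rw [List.nil_append])
    rw [List.nil_append] at this
    rw [hof, ← h0, this]
  -- A's side: first round, then pvAlem
  have hA : pvLoopA frontiers blocks none
      = pvFrontierOf frontiers
          (pvClos frontiers (PySem.Set.union blocks (pvFrontierOf frontiers blocks))
            ((PySem.Set.union blocks (pvFrontierOf frontiers blocks)).drop blocks.length)) := by
    rw [pvLoopA]
    exact pvAlem frontiers _ blocks (le_refl _)
  -- the bridge: one closure round from (blocks, blocks)
  have hbridge : pvClos frontiers blocks blocks
      = pvClos frontiers (PySem.Set.union blocks (pvFrontierOf frontiers blocks))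
          ((PySem.Set.union blocks (pvFrontierOf frontiers blocks)).drop blocks.length) := by
    have hW : blocks.foldl (pvStepA frontiers) blocks
        = PySem.Set.union blocks (pvFrontierOf frontiers blocks) := by
      have h1 : PySem.Set.union blocks ([] : List Int) = blocks := by
        rw [PySem.Set.union_eq_update, PySem.Set.update_nil]
      calc blocks.foldl (pvStepA frontiers) blocks
          = blocks.foldl (pvStepA frontiers) (PySem.Set.union blocks []) := by rw [h1]
        _ = PySem.Set.union blocks (blocks.foldl (pvStepA frontiers) []) :=
            pvFoldU frontiers blocks blocks []
        _ = PySem.Set.union blocks (pvFrontierOf frontiers blocks) := rfl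
    have := pvRound frontiers blocks blocks []
    rw [List.append_nil, List.nil_append] at this
    rw [this, hW]
  rw [hA, hB, hbridge]
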